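-- pv_equiv track=rewrite | github.com/clintonkopotic/FreeCodeCampDailyCodingChallenges | 2025/10/18 - Missing Socks/python/main.py | sock_pairs
-- ===== SOURCE A (Python) =====
-- import math
--
-- def sock_pairs(pairs, cycles):
--     def is_integer(value):
--         return isinstance(value, int) or (isinstance(value, float) and value.is_integer())
--
--     if not is_integer(pairs) or not is_integer(cycles):
--         return None
--
--     numberOfSocks = pairs * 2
--
--     for cycle in range(1, cycles + 1):
--         # Every 2 wash cycles, you lose a single sock.
--         if cycle % 2 == 0:
--             numberOfSocks -= 1
--
--         # Every 3 wash cycles, you find a single missing sock.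
--         if cycle % 3 == 0:
--             numberOfSocks += 1
--
--         # Every 5 wash cycles, a single sock is worn out and must be thrown away.
--         if cycle % 5 == 0:
--             numberOfSocks -= 1
--
--         # Every 10 wash cycles, you buy a pair of socks.
--         if cycle % 10 == 0:
--             numberOfSocks += 2
--
--         # You can never have less than zero total socks.
--         if numberOfSocks < 0:
--             numberOfSocks = 0
--
--     # Return the number of complete pairs of socks.
--     return math.floor(numberOfSocks / 2)
-- ===== SOURCE B (Python) =====
-- import math
--
-- def sock_pairs(pairs, cycles):
--     def is_integer(value):
--         return isinstance(value, int) or (isinstance(value, float) and value.is_integer())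
--
--     if not is_integer(pairs) or not is_integer(cycles):
--         return None
--
--     def delta(c):
--         return ((-1 if c % 2 == 0 else 0) + (1 if c % 3 == 0 else 0)
--                 + (-1 if c % 5 == 0 else 0) + (2 if c % 10 == 0 else 0))
--
--     def block(s):
--         # one full 30-cycle period, with the never-below-zero clamp
--         for c in range(1, 31):
--             s += delta(c)
--             if s < 0:
--                 s = 0
--         return s
--
--     s = pairs * 2
--     if cycles > 0:
--         k, r = divmod(cycles, 30)
--     else:
--         k, r = 0, 0
--
--     while k > 0:
--         if s >= 6:
--             # no clamp can fire while the block starts at >= 6 (min prefix is -6):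
--             # each such block is exactly s -> s - 5; skip them all arithmetically
--             t = min(k, (s - 6) // 5 + 1)
--             s -= 5 * t
--             k -= t
--         else:
--             s2 = block(s)
--             if s2 == s:
--                 k = 0  # fixed point: remaining blocks change nothing
--             else:
--                 s = s2
--                 k -= 1
--
--     for c in range(1, r + 1):
--         s += delta(c)
--         if s < 0:
--             s = 0
--
--     return math.floor(s / 2)
-- ===== Notes on version B (the rewrite author's own statement) =====
-- stated objective: faster
-- what changed: B replaces A's cycle-by-cycle simulation with block arithmetic on the 30-cycle period: it skips all clamp-free periods in closed form (each is exactly s -> s-5 while s >= 6), simulates at most a couple of periods until the clamped state reaches its fixed point, then runs only the < 30 remainder cycles.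
import Mathlib
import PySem

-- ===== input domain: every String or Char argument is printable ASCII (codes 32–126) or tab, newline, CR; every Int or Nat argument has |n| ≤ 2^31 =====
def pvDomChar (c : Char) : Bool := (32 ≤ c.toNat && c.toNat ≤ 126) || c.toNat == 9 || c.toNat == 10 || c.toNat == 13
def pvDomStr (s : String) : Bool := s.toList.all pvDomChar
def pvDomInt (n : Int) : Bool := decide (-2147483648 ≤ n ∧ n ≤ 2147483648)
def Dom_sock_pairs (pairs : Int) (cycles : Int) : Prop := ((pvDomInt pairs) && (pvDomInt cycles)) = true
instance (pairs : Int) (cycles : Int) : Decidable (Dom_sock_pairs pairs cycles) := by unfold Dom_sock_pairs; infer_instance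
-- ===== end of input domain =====

-- B replaces A's O(cycles) per-cycle simulation by a closed-form skip over the clamp-free
-- 30-cycle periods plus at most a couple of simulated periods (fixed point), same return value.

-- ===== PORT A =====
-- one iteration of A's for-loop body (cycle is the Python loop variable)
def pvStepA (s : Int) (cycle : Int) : Int :=
  let s1 := if PySem.Int.mod cycle 2 = 0 then s - 1 else s
  let s2 := if PySem.Int.mod cycle 3 = 0 then s1 + 1 else s1
  let s3 := if PySem.Int.mod cycle 5 = 0 then s2 - 1 else s2
  let s4 := if PySem.Int.mod cycle 10 = 0 then s3 + 2 else s3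
  if s4 < 0 then 0 else s4

def sock_pairs (pairs : Int) (cycles : Int) : Int :=
  -- is_integer guard: always true for Int arguments, never returns None here
  let n := (PySem.List.pyRange 1 (cycles + 1) 1).foldl pvStepA (pairs * 2)
  -- math.floor(n / 2): exact floor division for integers of the magnitude Dom admits
  PySem.Int.floordiv n 2

-- ===== PORT B =====
def pvDeltaB (c : Int) : Int :=
  (if PySem.Int.mod c 2 = 0 then (-1 : Int) else 0) + (if PySem.Int.mod c 3 = 0 then 1 else 0)
    + (if PySem.Int.mod c 5 = 0 then -1 else 0) + (if PySem.Int.mod c 10 = 0 then 2 else 0)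

-- loop body `s += delta(c); if s < 0: s = 0` of B's block/remainder loops
def pvStepB (s : Int) (c : Int) : Int :=
  let s' := s + pvDeltaB c
  if s' < 0 then 0 else s'

def pvBlockB (s : Int) : Int :=
  (PySem.List.pyRange 1 31 1).foldl pvStepB s

-- B's while-loop over the k full 30-cycle blocks
def pvWhileB (s : Int) (k : Nat) : Int :=
  match k with
  | 0 => s
  | Nat.succ k0 =>
    if 6 ≤ s then
      let t : Nat := min (k0 + 1) ((PySem.Int.floordiv (s - 6) 5).toNat + 1)
      pvWhileB (s - 5 * (t : Int)) (k0 + 1 - t)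
    else
      let s2 := pvBlockB s
      if s2 = s then s else pvWhileB s2 k0
  termination_by k
  decreasing_by
  all_goals omega

def sock_pairs_alt (pairs : Int) (cycles : Int) : Int :=
  let s0 := pairs * 2
  let kr : Nat × Nat :=
    if 0 < cycles then ((PySem.Int.floordiv cycles 30).toNat, (PySem.Int.mod cycles 30).toNat)
    else (0, 0)
  let s1 := pvWhileB s0 kr.1
  let s2 := (PySem.List.pyRange 1 ((kr.2 : Int) + 1) 1).foldl pvStepB s1
  PySem.Int.floordiv s2 2

-- ===== PRECONDITION & SPEC =====
def Spec_sock_pairs (pairs : Int) (cycles : Int) (out : Int) : Prop := out = sock_pairs_alt pairs cycles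
instance (pairs : Int) (cycles : Int) (out : Int) : Decidable (Spec_sock_pairs pairs cycles out) := by unfold Spec_sock_pairs; infer_instance

-- ===== CLAIM (what is proved, stated in full; the proofs are below) =====
def Claim_equal_sock_pairs : Prop := ∀ (pairs : Int) (cycles : Int), Dom_sock_pairs pairs cycles → Spec_sock_pairs pairs cycles (sock_pairs pairs cycles)

-- ===== LEMMAS AND PROOFS =====

-- A's step is B's step
theorem pvStepA_eq : pvStepA = pvStepB := by
  funext s c
  simp only [pvStepA, pvStepB, pvDeltaB]
  split_ifs <;> omega

-- simulate n cycles base+1 .. base+n with step f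
def pvSim (f : Int → Int → Int) (base s : Int) : Nat → Int
  | 0 => s
  | n+1 => f (pvSim f base s n) (base + ((n : Int) + 1))

theorem pvFold_eq (f : Int → Int → Int) (base s : Int) (n : Nat) :
    (PySem.List.pyRange (base + 1) (base + (n : Int) + 1) 1).foldl f s = pvSim f base s n := by
  induction n generalizing s with
  | zero => simp [pvSim, PySem.List.pyRange_one_eq_nil]
  | succ n ih =>
    have h : base + ((n+1 : Nat) : Int) + 1 = (base + (n : Int) + 1) + 1 := by push_cast; ring
    rw [h, PySem.List.pyRange_one_succ_right (by omega), List.foldl_append]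
    simp [pvSim, ih, List.foldl]
    congr 1
    ring

def pvPrefix : Nat → Int
  | 0 => 0
  | n+1 => pvPrefix n + pvDeltaB ((n : Int) + 1)

theorem pvSim_noclamp (s : Int) (n : Nat) (h : ∀ j : Nat, j ≤ n → 0 ≤ s + pvPrefix j) :
    pvSim pvStepB 0 s n = s + pvPrefix n := by
  induction n with
  | zero => simp [pvSim, pvPrefix]
  | succ n ih =>
    have ih' := ih (fun j hj => h j (by omega))
    have hn := h (n+1) (le_refl _)
    simp only [pvSim, ih', pvStepB, pvPrefix, zero_add] at *
    omega

theorem pvPrefix_bound : ∀ j : Nat, j ≤ 30 → -6 ≤ pvPrefix j := by decide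

theorem pvPrefix_30 : pvPrefix 30 = -5 := by decide

theorem pvBlockB_eq_sim (s : Int) : pvBlockB s = pvSim pvStepB 0 s 30 := by
  have := pvFold_eq pvStepB 0 s 30
  simpa [pvBlockB] using this

theorem pvBlockB_noclamp (s : Int) (hs : 6 ≤ s) : pvBlockB s = s - 5 := by
  rw [pvBlockB_eq_sim, pvSim_noclamp s 30 (fun j hj => by have := pvPrefix_bound j hj; omega),
    pvPrefix_30]
  ring

theorem pvDeltaB_add30 (c : Int) : pvDeltaB (c + 30) = pvDeltaB c := by
  have h2 : PySem.Int.mod (c + 30) 2 = PySem.Int.mod c 2 := by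
    rw [PySem.Int.mod_eq_emod_of_pos (by norm_num), PySem.Int.mod_eq_emod_of_pos (by norm_num)]
    omega
  have h3 : PySem.Int.mod (c + 30) 3 = PySem.Int.mod c 3 := by
    rw [PySem.Int.mod_eq_emod_of_pos (by norm_num), PySem.Int.mod_eq_emod_of_pos (by norm_num)]
    omega
  have h5 : PySem.Int.mod (c + 30) 5 = PySem.Int.mod c 5 := by
    rw [PySem.Int.mod_eq_emod_of_pos (by norm_num), PySem.Int.mod_eq_emod_of_pos (by norm_num)]
    omega
  have h10 : PySem.Int.mod (c + 30) 10 = PySem.Int.mod c 10 := by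
    rw [PySem.Int.mod_eq_emod_of_pos (by norm_num), PySem.Int.mod_eq_emod_of_pos (by norm_num)]
    omega
  simp only [pvDeltaB, h2, h3, h5, h10]

theorem pvSim_shift (base s : Int) (n : Nat) :
    pvSim pvStepB (base + 30) s n = pvSim pvStepB base s n := by
  induction n with
  | zero => rfl
  | succ n ih =>
    simp only [pvSim, ih]
    have : base + 30 + ((n : Int) + 1) = (base + ((n : Int) + 1)) + 30 := by ring
    rw [this]
    simp [pvStepB, pvDeltaB_add30]

theorem pvSim_append (base s : Int) (m n : Nat) :
    pvSim pvStepB base s (m + n) = pvSim pvStepB (base + (m : Int)) (pvSim pvStepB base s m) n := by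
  induction n with
  | zero => rfl
  | succ n ih =>
    simp only [pvSim, Nat.add_eq]
    rw [ih]
    congr 1
    push_cast [Nat.add_eq]
    ring

def pvIter : Nat → Int → Int
  | 0, s => s
  | k+1, s => pvIter k (pvBlockB s)

theorem pvSim_decomp (s : Int) (k r : Nat) :
    pvSim pvStepB 0 s (30 * k + r) = pvSim pvStepB 0 (pvIter k s) r := by
  induction k generalizing s with
  | zero => simp [pvIter]
  | succ k ih =>
    have h : 30 * (k+1) + r = 30 + (30 * k + r) := by ring
    rw [h, pvSim_append 0 s 30 (30 * k + r)]
    have h30 : (0 : Int) + ((30:Nat) : Int) = 0 + 30 := by norm_num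
    rw [h30, pvSim_shift, ← pvBlockB_eq_sim, ih]
    rfl

theorem pvIter_skip (t : Nat) : ∀ (k : Nat) (s : Int), t ≤ k → (∀ j : Nat, j < t → 6 ≤ s - 5 * (j : Int)) →
    pvIter k s = pvIter (k - t) (s - 5 * (t : Int)) := by
  induction t with
  | zero => intro k s _ _; simp
  | succ t ih =>
    intro k s hk h
    obtain ⟨k0, rfl⟩ : ∃ k0, k = k0 + 1 := ⟨k - 1, by omega⟩
    have h0 : 6 ≤ s := by have := h 0 (by omega); simpa using this
    have step : pvIter (k0 + 1) s = pvIter k0 (s - 5) := by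
      simp [pvIter, pvBlockB_noclamp s h0]
    rw [step, ih k0 (s - 5) (by omega) (fun j hj => by
      have := h (j+1) (by omega); push_cast at this ⊢; omega)]
    congr 1
    · omega
    · push_cast; ring

theorem pvIter_fixed (s : Int) (hf : pvBlockB s = s) : ∀ k, pvIter k s = s := by
  intro k
  induction k with
  | zero => rfl
  | succ k ih => simp [pvIter, hf, ih]

theorem pvWhileB_eq_iter : ∀ (k : Nat) (s : Int), pvWhileB s k = pvIter k s := by
  intro k
  induction k using Nat.strong_induction_on with
  | _ k ih =>
    intro s
    match k with
    | 0 => rw [pvWhileB]; rfl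
    | Nat.succ k0 =>
      rw [pvWhileB]
      by_cases hs : 6 ≤ s
      · rw [if_pos hs]
        set t : Nat := min (k0 + 1) ((PySem.Int.floordiv (s - 6) 5).toNat + 1) with ht
        have hfd : PySem.Int.floordiv (s - 6) 5 = (s - 6) / 5 :=
          PySem.Int.floordiv_eq_ediv_of_pos (by norm_num)
        have ht1 : 1 ≤ t := by omega
        have htk : t ≤ k0 + 1 := by omega
        rw [ih (k0 + 1 - t) (by omega)]
        rw [pvIter_skip t (k0+1) s htk]
        intro j hj
        have hj' : j ≤ (PySem.Int.floordiv (s - 6) 5).toNat := by omega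
        have : (j : Int) ≤ (s - 6) / 5 := by
          rw [hfd] at hj'
          omega
        omega
      · rw [if_neg hs]
        by_cases hfix : pvBlockB s = s
        · rw [if_pos hfix, pvIter_fixed s hfix]
        · rw [if_neg hfix, ih k0 (by omega)]
          rfl

theorem pvFold_zero (f : Int → Int → Int) (s : Int) (n : Nat) :
    (PySem.List.pyRange 1 ((n : Int) + 1) 1).foldl f s = pvSim f 0 s n := by
  have := pvFold_eq f 0 s n
  simpa using this

-- ===== VERDICT (by name: the statement is the Claim_ definition above) =====
theorem sock_pairs_spec : Claim_equal_sock_pairs := by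
  intro pairs cycles _dom
  unfold Spec_sock_pairs sock_pairs sock_pairs_alt
  by_cases hc : 0 < cycles
  · have hK : PySem.Int.floordiv cycles 30 = cycles / 30 :=
      PySem.Int.floordiv_eq_ediv_of_pos (by norm_num)
    have hR : PySem.Int.mod cycles 30 = cycles % 30 :=
      PySem.Int.mod_eq_emod_of_pos (by norm_num)
    set K : Nat := (PySem.Int.floordiv cycles 30).toNat with hKdef
    set R : Nat := (PySem.Int.mod cycles 30).toNat with hRdef
    have hn : cycles.toNat = 30 * K + R := by
      rw [hKdef, hRdef, hK, hR]; omega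
    have hcyc : cycles + 1 = ((cycles.toNat : Int)) + 1 := by omega
    rw [if_pos hc]
    simp only []
    rw [hcyc, pvFold_zero, pvStepA_eq, hn, pvSim_decomp, pvFold_zero, pvWhileB_eq_iter]
  · rw [if_neg hc]
    simp only []
    rw [PySem.List.pyRange_one_eq_nil (by omega : cycles + 1 ≤ 1)]
    have : ((((0:Nat)) : Int) + 1) = 1 := by norm_num
    rw [this, PySem.List.pyRange_one_eq_nil (by omega : (1:Int) ≤ 1)]
    simp only [List.foldl_nil]
    rw [pvWhileB]
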